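-- pv_equiv track=rewrite | github.com/DanDuhon/DSBG-Shuffle-streamlit | core/character_stats.py | souls_to_upgrade
-- ===== SOURCE A (Python) =====
-- UPGRADE_COSTS = [2, 4, 8]  # base->1, 1->2, 2->3
--
-- def souls_to_upgrade(from_tier: int, to_tier: int) -> int:
--     """Return total souls required to upgrade from from_tier to to_tier (exclusive of from_tier).
--
--     Example: from 0 to 2 = cost for 0->1 + 1->2 (2 + 4 = 6)
--     """
--     if to_tier <= from_tier:
--         return 0
--     total = 0
--     for i in range(from_tier, to_tier):
--         if i < 0 or i >= len(UPGRADE_COSTS):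
--             continue
--         total += UPGRADE_COSTS[i]
--     return total
-- ===== SOURCE B (Python) =====
-- UPGRADE_COSTS = [2, 4, 8]  # base->1, 1->2, 2->3
--
-- # Prefix sums of the costs: _CUM[k] = total souls from tier 0 up to tier k.
-- _CUM = [0]
-- for _c in UPGRADE_COSTS:
--     _CUM.append(_CUM[-1] + _c)
--
-- def souls_to_upgrade(from_tier: int, to_tier: int) -> int:
--     """Difference of two prefix-sum table lookups at clamped tiers (O(1), no loop)."""
--     n = len(UPGRADE_COSTS)
--     lo = min(max(from_tier, 0), n)
--     hi = min(max(to_tier, 0), n)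
--     return max(0, _CUM[hi] - _CUM[lo])
-- ===== Notes on version B (the rewrite author's own statement) =====
-- stated objective: faster
-- what changed: Replaces the per-call loop over the tier range (with per-element bounds checks) by a prefix-sum table built once at module load; each call is a difference of two table lookups at clamped indices, with max(0,.) handling the reversed-range case instead of the early-return guard.
import Mathlib
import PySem

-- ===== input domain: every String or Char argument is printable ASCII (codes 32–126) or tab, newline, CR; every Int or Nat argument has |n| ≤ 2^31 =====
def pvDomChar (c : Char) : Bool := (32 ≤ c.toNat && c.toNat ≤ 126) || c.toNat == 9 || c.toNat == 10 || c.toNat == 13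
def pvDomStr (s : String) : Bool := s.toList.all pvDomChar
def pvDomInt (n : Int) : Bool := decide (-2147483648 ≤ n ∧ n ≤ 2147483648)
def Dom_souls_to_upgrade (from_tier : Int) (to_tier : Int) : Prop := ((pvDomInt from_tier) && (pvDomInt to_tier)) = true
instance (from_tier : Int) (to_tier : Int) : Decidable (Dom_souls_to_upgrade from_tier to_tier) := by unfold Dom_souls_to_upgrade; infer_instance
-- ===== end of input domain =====

-- B replaces A's per-call loop over the tier range by a prefix-sum table built once,
-- answering each call as a difference of two table lookups at clamped indices.

-- ===== PORT A =====
def UPGRADE_COSTS : List Int := [2, 4, 8]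

def souls_to_upgrade (from_tier : Int) (to_tier : Int) : Int :=
  if to_tier ≤ from_tier then 0
  else
    (PySem.List.pyRange from_tier to_tier 1).foldl
      (fun total i =>
        if i < 0 || (UPGRADE_COSTS.length : Int) ≤ i then total
        else total + PySem.List.pyGetD UPGRADE_COSTS i 0) 0

-- ===== PORT B =====
-- _CUM = [0]; for c in UPGRADE_COSTS: _CUM.append(_CUM[-1] + c)
def pvCUM : List Int :=
  UPGRADE_COSTS.foldl (fun acc c => acc ++ [PySem.List.pyGetD acc (-1) 0 + c]) [0]

def souls_to_upgrade_alt (from_tier : Int) (to_tier : Int) : Int :=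
  let n : Int := (UPGRADE_COSTS.length : Int)
  let lo := min (max from_tier 0) n
  let hi := min (max to_tier 0) n
  max 0 (PySem.List.pyGetD pvCUM hi 0 - PySem.List.pyGetD pvCUM lo 0)

-- ===== PRECONDITION & SPEC =====
def Spec_souls_to_upgrade (from_tier : Int) (to_tier : Int) (out : Int) : Prop := out = souls_to_upgrade_alt from_tier to_tier
instance (from_tier : Int) (to_tier : Int) (out : Int) : Decidable (Spec_souls_to_upgrade from_tier to_tier out) := by unfold Spec_souls_to_upgrade; infer_instance

-- ===== CLAIM (what is proved, stated in full; the proofs are below) =====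
def Claim_equal_souls_to_upgrade : Prop := ∀ (from_tier : Int) (to_tier : Int), Dom_souls_to_upgrade from_tier to_tier → Spec_souls_to_upgrade from_tier to_tier (souls_to_upgrade from_tier to_tier)

-- ===== LEMMAS AND PROOFS =====

-- Mathematical description of the prefix-sum table lookup at a clamped index.
def pvS (x : Int) : Int := if x ≤ 0 then 0 else if x = 1 then 2 else if x = 2 then 6 else 14

def pvStep (total i : Int) : Int :=
  if i < 0 || (UPGRADE_COSTS.length : Int) ≤ i then total
  else total + PySem.List.pyGetD UPGRADE_COSTS i 0

lemma pvStep_shift (a x : Int) : pvStep a x = a + pvStep 0 x := by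
  unfold pvStep; split <;> ring

lemma pvFoldl_shift (l : List Int) (a : Int) :
    l.foldl pvStep a = a + l.foldl pvStep 0 := by
  induction l generalizing a with
  | nil => simp
  | cons x l ih =>
    simp only [List.foldl_cons]
    rw [ih (pvStep a x), ih (pvStep 0 x), pvStep_shift]; ring

lemma pvStep_val (f : Int) : pvStep 0 f = pvS (f + 1) - pvS f := by
  rcases lt_trichotomy f 0 with h | h | h
  · simp only [pvStep, pvS]
    have : (f < 0 || (UPGRADE_COSTS.length : Int) ≤ f) = true := by
      simp; omega
    rw [if_pos this]
    rw [if_pos (by omega : f + 1 ≤ 0), if_pos (by omega : f ≤ 0)]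
    ring
  · subst h; decide
  · rcases (by omega : f = 1 ∨ f = 2 ∨ 3 ≤ f) with h | h | h
    · subst h; decide
    · subst h; decide
    · simp only [pvStep, pvS]
      have : (f < 0 || (UPGRADE_COSTS.length : Int) ≤ f) = true := by
        simp [UPGRADE_COSTS]; omega
      rw [if_pos this]
      rw [if_neg (by omega : ¬ f + 1 ≤ 0), if_neg (by omega : ¬ f + 1 = 1),
          if_neg (by omega : ¬ f + 1 = 2), if_neg (by omega : ¬ f ≤ 0),
          if_neg (by omega : ¬ f = 1), if_neg (by omega : ¬ f = 2)]
      ring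

lemma pvFoldl_range (f t : Int) (h : f ≤ t) :
    (PySem.List.pyRange f t 1).foldl pvStep 0 = pvS t - pvS f := by
  have hn : ∃ n : Nat, t - f = (n : Int) := ⟨(t - f).toNat, by omega⟩
  obtain ⟨n, hn⟩ := hn
  induction n generalizing f with
  | zero =>
    have : t = f := by omega
    subst this
    rw [PySem.List.pyRange_one_eq_nil le_rfl]
    simp
  | succ n ih =>
    have hf : f < t := by omega
    rw [PySem.List.pyRange_one_cons hf]
    simp only [List.foldl_cons]
    rw [pvFoldl_shift, ih (f + 1) (by omega) (by omega), pvStep_val]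
    ring

lemma pvCUM_eq : pvCUM = [0, 2, 6, 14] := by decide

lemma pvLookup (x : Int) :
    PySem.List.pyGetD pvCUM (min (max x 0) (UPGRADE_COSTS.length : Int)) 0 = pvS x := by
  rcases (by omega : x ≤ 0 ∨ x = 1 ∨ x = 2 ∨ 3 ≤ x) with h | h | h | h
  · have h0 : min (max x 0) (UPGRADE_COSTS.length : Int) = 0 := by
      simp [UPGRADE_COSTS]; omega
    rw [h0, pvCUM_eq]
    unfold pvS; rw [if_pos h]
    decide
  · subst h; rw [pvCUM_eq]; decide
  · subst h; rw [pvCUM_eq]; decide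
  · have h3 : min (max x 0) (UPGRADE_COSTS.length : Int) = 3 := by
      simp [UPGRADE_COSTS]; omega
    rw [h3, pvCUM_eq]
    unfold pvS
    rw [if_neg (by omega), if_neg (by omega), if_neg (by omega)]
    decide

lemma pvS_mono {a b : Int} (h : a ≤ b) : pvS a ≤ pvS b := by
  unfold pvS; split_ifs <;> omega

lemma pvAlt_eq (f t : Int) :
    souls_to_upgrade_alt f t = max 0 (pvS t - pvS f) := by
  unfold souls_to_upgrade_alt
  simp only []
  rw [pvLookup, pvLookup]

-- ===== VERDICT (by name: the statement is the Claim_ definition above) =====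
theorem souls_to_upgrade_spec : Claim_equal_souls_to_upgrade := by
  intro f t _
  unfold Spec_souls_to_upgrade
  rw [pvAlt_eq]
  by_cases h : t ≤ f
  · have hle : pvS t ≤ pvS f := pvS_mono h
    unfold souls_to_upgrade
    rw [if_pos h]
    omega
  · push Not at h
    have hfold := pvFoldl_range f t (le_of_lt h)
    have hge : pvS f ≤ pvS t := pvS_mono (le_of_lt h)
    unfold souls_to_upgrade
    rw [if_neg (by omega)]
    calc (PySem.List.pyRange f t 1).foldl
          (fun total i =>
            if i < 0 || (UPGRADE_COSTS.length : Int) ≤ i then total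
            else total + PySem.List.pyGetD UPGRADE_COSTS i 0) 0
        = (PySem.List.pyRange f t 1).foldl pvStep 0 := rfl
      _ = pvS t - pvS f := hfold
      _ = max 0 (pvS t - pvS f) := by omega
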